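-- pv_equiv track=rewrite | github.com/gotham29/workload_assessor | source/pipeline/run_pipeline.py | score_wl_detections
-- ===== SOURCE A (Python) =====
-- def score_wl_detections(data_size, wl_changepoints, wl_changepoints_detected, change_detection_window):
--     scores = {'true_pos': 0, 'false_pos': 0, 'true_neg': 0, 'false_neg': 0}
--     # check if known changepoints detected
--     wl_changepoints_windows = {}
--     for cp in wl_changepoints:
--         cp_detected = False
--         cp_window = [cp + 1, min((cp + change_detection_window), data_size)]
--         cp_detected_in_window = [v for v in wl_changepoints_detected if v in range(cp_window[0], cp_window[1])]
--         wl_changepoints_windows[cp] = cp_window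
--         if len(cp_detected_in_window):
--             cp_detected = True
--         # if not cp_detected:
--         #     scores['false_neg'] += 1
--         if cp_detected:
--             scores['true_pos'] += 1
--         else:
--             scores['false_neg'] += 1
--     # check for false pos
--     for cp in wl_changepoints_detected:
--         cp_in_detection_window = False
--         for cp_, window in wl_changepoints_windows.items():
--             if cp in range(window[0], window[1]):
--                 cp_in_detection_window = True
--         if not cp_in_detection_window:
--             scores['false_pos'] += 1
--         # else:  # cp does fall in a detection window
--         #     scores['true_pos'] += 1
--     # check for true neg
--     rows_neg = [_ for _ in range(data_size)]
--     for wl, cp_window in wl_changepoints_windows.items():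
--         for _ in range(cp_window[0], cp_window[1]):
--             if _ in rows_neg:
--                 rows_neg.remove(_)
--     true_neg = [v for v in rows_neg if v not in wl_changepoints_detected]
--     scores['true_neg'] = len(true_neg)
--
--     return scores, wl_changepoints_windows
-- ===== SOURCE B (Python) =====
-- def score_wl_detections(data_size, wl_changepoints, wl_changepoints_detected, change_detection_window):
--     windows = {cp: [cp + 1, min(cp + change_detection_window, data_size)]
--                for cp in wl_changepoints}
--     spans = list(windows.values())
--
--     def covered(x):
--         return any(lo <= x < hi for lo, hi in spans)
--
--     detected = set(wl_changepoints_detected)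
--     true_pos = sum(1 for cp in wl_changepoints
--                    if any(cp + 1 <= v < min(cp + change_detection_window, data_size)
--                           for v in wl_changepoints_detected))
--     scores = {
--         'true_pos': true_pos,
--         'false_pos': sum(1 for v in wl_changepoints_detected if not covered(v)),
--         'true_neg': sum(1 for x in range(data_size) if not covered(x) and x not in detected),
--         'false_neg': len(wl_changepoints) - true_pos,
--     }
--     return scores, windows
-- ===== Notes on version B (the rewrite author's own statement) =====
-- stated objective: faster
-- what changed: B replaces A's mutating dict-counter loops and its quadratic rows_neg construction (building range(data_size) as a list and removing each covered row by linear scan, then filtering with a linear list-membership test) by direct comprehension counts: TP/FP/FN as single-pass counts and TN as one pass over range(data_size) with an interval check per window and an O(1) set lookup for detections.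
import Mathlib
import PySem

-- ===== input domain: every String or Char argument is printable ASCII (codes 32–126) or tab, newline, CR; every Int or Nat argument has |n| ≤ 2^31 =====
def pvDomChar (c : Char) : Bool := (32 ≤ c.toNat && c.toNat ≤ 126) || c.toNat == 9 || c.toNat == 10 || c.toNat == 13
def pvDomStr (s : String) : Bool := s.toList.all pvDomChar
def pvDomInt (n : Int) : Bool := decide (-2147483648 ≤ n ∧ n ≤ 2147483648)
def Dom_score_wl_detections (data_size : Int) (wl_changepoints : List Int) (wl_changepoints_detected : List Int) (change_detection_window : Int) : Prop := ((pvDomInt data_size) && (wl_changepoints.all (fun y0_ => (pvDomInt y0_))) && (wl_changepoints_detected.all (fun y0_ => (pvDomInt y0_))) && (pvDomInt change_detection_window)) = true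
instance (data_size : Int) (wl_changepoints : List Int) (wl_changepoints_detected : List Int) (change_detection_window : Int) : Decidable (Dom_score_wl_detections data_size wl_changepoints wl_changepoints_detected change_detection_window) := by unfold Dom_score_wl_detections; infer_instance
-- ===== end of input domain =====

-- B replaces A's dict-increment loops and its quadratic rows_neg list surgery by direct
-- comprehension counts over the same data (objective: faster by a constant-factor mechanism:
-- no O(data_size) list membership/removal per covered row, set lookup instead of list scan).

-- ===== PORT A =====

-- `v in range(a, b)`: Python's O(1) range-membership test for step 1; exact: a ≤ v < b
def pvInRange (a b v : Int) : Bool := decide (a ≤ v) && decide (v < b)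

-- body of A's first loop: classify one changepoint (TP/FN) and record its window
def pvStep1 (data_size change_detection_window : Int) (wl_changepoints_detected : List Int)
    (st : PySem.Dict String Int × PySem.Dict Int (List Int)) (cp : Int) :
    PySem.Dict String Int × PySem.Dict Int (List Int) :=
  let cp_window : List Int := [cp + 1, min (cp + change_detection_window) data_size]
  let cp_detected_in_window := wl_changepoints_detected.filter (fun v =>
    pvInRange (PySem.List.pyGetD cp_window 0 0) (PySem.List.pyGetD cp_window 1 0) v)
  let w' := st.2.insert cp cp_window
  -- `if len(cp_detected_in_window):` — nonempty list is truthy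
  if cp_detected_in_window.length != 0 then (st.1.modify "true_pos" 0 (· + 1), w')
  else (st.1.modify "false_neg" 0 (· + 1), w')

-- flag of A's second loop: does cp fall in any recorded detection window?
def pvFlag2 (w : PySem.Dict Int (List Int)) (cp : Int) : Bool :=
  w.items.foldl (fun f p =>
    if pvInRange (PySem.List.pyGetD p.2 0 0) (PySem.List.pyGetD p.2 1 0) cp then true else f) false

-- body of A's third loop: remove every row of one window from rows_neg
def pvStep3 (r : List Int) (p : Int × List Int) : List Int :=
  (PySem.List.pyRange (PySem.List.pyGetD p.2 0 0) (PySem.List.pyGetD p.2 1 0) 1).foldl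
    (fun r x => if r.contains x then (PySem.List.remove? r x).getD r else r) r

def score_wl_detections (data_size : Int) (wl_changepoints : List Int)
    (wl_changepoints_detected : List Int) (change_detection_window : Int) :
    (List (String × Int)) × (List (Int × List Int)) :=
  let scores0 : PySem.Dict String Int :=
    PySem.Dict.ofList [("true_pos", 0), ("false_pos", 0), ("true_neg", 0), ("false_neg", 0)]
  let st := wl_changepoints.foldl
    (pvStep1 data_size change_detection_window wl_changepoints_detected) (scores0, PySem.Dict.empty)
  let scores2 := wl_changepoints_detected.foldl (fun s cp =>
    if !pvFlag2 st.2 cp then s.modify "false_pos" 0 (· + 1) else s) st.1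
  let rows_neg := st.2.items.foldl pvStep3 (PySem.List.pyRange 0 data_size 1)
  let true_neg := rows_neg.filter (fun v => !wl_changepoints_detected.contains v)
  let scores3 := scores2.insert "true_neg" (true_neg.length : Int)
  (scores3.items, st.2.items)

-- ===== PORT B =====

-- one span `lo, hi` covers x (B destructures each span; every stored span has two elements)
def pvSpanCovers (x : Int) (s : List Int) : Bool :=
  match s with
  | [lo, hi] => decide (lo ≤ x) && decide (x < hi)
  | _ => false

def score_wl_detections_alt (data_size : Int) (wl_changepoints : List Int)
    (wl_changepoints_detected : List Int) (change_detection_window : Int) :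
    (List (String × Int)) × (List (Int × List Int)) :=
  let windows : PySem.Dict Int (List Int) := wl_changepoints.foldl
    (fun d cp => d.insert cp [cp + 1, min (cp + change_detection_window) data_size])
    PySem.Dict.empty
  let spans := windows.values
  let covered := fun (x : Int) => spans.any (pvSpanCovers x)
  let detected := PySem.Set.ofList wl_changepoints_detected
  let true_pos : Int := wl_changepoints.countP (fun cp => wl_changepoints_detected.any
    (fun v => decide (cp + 1 ≤ v) && decide (v < min (cp + change_detection_window) data_size)))
  ([("true_pos", true_pos),
    ("false_pos", (wl_changepoints_detected.countP (fun v => !covered v) : Int)),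
    ("true_neg", ((PySem.List.pyRange 0 data_size 1).countP
      (fun x => !covered x && !detected.contains x) : Int)),
    ("false_neg", (wl_changepoints.length : Int) - true_pos)],
   windows.items)

-- ===== PRECONDITION & SPEC =====
def Spec_score_wl_detections (data_size : Int) (wl_changepoints : List Int) (wl_changepoints_detected : List Int) (change_detection_window : Int) (out : (List (String × Int)) × (List (Int × List Int))) : Prop := out = score_wl_detections_alt data_size wl_changepoints wl_changepoints_detected change_detection_window
instance (data_size : Int) (wl_changepoints : List Int) (wl_changepoints_detected : List Int) (change_detection_window : Int) (out : (List (String × Int)) × (List (Int × List Int))) : Decidable (Spec_score_wl_detections data_size wl_changepoints wl_changepoints_detected change_detection_window out) := by unfold Spec_score_wl_detections; infer_instance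

-- ===== CLAIM (what is proved, stated in full; the proofs are below) =====
def Claim_equal_score_wl_detections : Prop := ∀ (data_size : Int) (wl_changepoints : List Int) (wl_changepoints_detected : List Int) (change_detection_window : Int), Dom_score_wl_detections data_size wl_changepoints wl_changepoints_detected change_detection_window → Spec_score_wl_detections data_size wl_changepoints wl_changepoints_detected change_detection_window (score_wl_detections data_size wl_changepoints wl_changepoints_detected change_detection_window)

-- ===== LEMMAS AND PROOFS =====

-- the four-counter scores dict in the shape A keeps it in
def pvScores (a b c d : Int) : PySem.Dict String Int :=
  PySem.Dict.ofList [("true_pos", a), ("false_pos", b), ("true_neg", c), ("false_neg", d)]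

lemma pvScores_tp (a b c d : Int) :
    (pvScores a b c d).modify "true_pos" 0 (· + 1) = pvScores (a + 1) b c d := rfl

lemma pvScores_fp (a b c d : Int) :
    (pvScores a b c d).modify "false_pos" 0 (· + 1) = pvScores a (b + 1) c d := rfl

lemma pvScores_fn (a b c d : Int) :
    (pvScores a b c d).modify "false_neg" 0 (· + 1) = pvScores a b c (d + 1) := rfl

lemma pvScores_tn (a b c d e : Int) :
    (pvScores a b c d).insert "true_neg" e = pvScores a b e d := rfl

-- A's per-changepoint detection test
def pvPA (n W : Int) (det : List Int) (cp : Int) : Bool :=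
  (det.filter (fun v => pvInRange (cp + 1) (min (cp + W) n) v)).length != 0

-- the windows-dict fold shared by both sides
def pvWFold (n W : Int) (cps : List Int) (d : PySem.Dict Int (List Int)) : PySem.Dict Int (List Int) :=
  cps.foldl (fun d cp => d.insert cp [cp + 1, min (cp + W) n]) d

lemma pvLoop1 (n W : Int) (det : List Int) (cps : List Int) (a b c d : Int)
    (w : PySem.Dict Int (List Int)) :
    cps.foldl (pvStep1 n W det) (pvScores a b c d, w)
      = (pvScores (a + (cps.countP (pvPA n W det) : Int)) b c
          (d + (cps.countP (fun cp => !pvPA n W det cp) : Int)), pvWFold n W cps w) := by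
  induction cps generalizing a d w with
  | nil => simp [pvWFold]
  | cons cp t ih =>
    simp only [List.foldl_cons, pvStep1]
    by_cases hp : pvPA n W det cp
    · have h1 : (cp :: t).countP (pvPA n W det) = t.countP (pvPA n W det) + 1 := by
        simp [hp]
      have h2 : (cp :: t).countP (fun cp => !pvPA n W det cp)
          = t.countP (fun cp => !pvPA n W det cp) := by simp [hp]
      rw [if_pos (by simpa [pvPA] using hp), pvScores_tp, ih, h1, h2]
      have e1 : a + 1 + (t.countP (pvPA n W det) : Int)
          = a + ((t.countP (pvPA n W det) + 1 : Nat) : Int) := by push_cast; ring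
      rw [e1]
      rfl
    · have h1 : (cp :: t).countP (pvPA n W det) = t.countP (pvPA n W det) := by
        simp [hp]
      have h2 : (cp :: t).countP (fun cp => !pvPA n W det cp)
          = t.countP (fun cp => !pvPA n W det cp) + 1 := by simp [hp]
      rw [if_neg (by simpa [pvPA] using hp), pvScores_fn, ih, h1, h2]
      have e1 : d + 1 + (t.countP (fun cp => !pvPA n W det cp) : Int)
          = d + ((t.countP (fun cp => !pvPA n W det cp) + 1 : Nat) : Int) := by push_cast; ring
      rw [e1]
      rfl

lemma pvWFold_get? (n W : Int) (cps : List Int) (d : PySem.Dict Int (List Int)) (k : Int) :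
    (pvWFold n W cps d).get? k
      = if k ∈ cps then some [k + 1, min (k + W) n] else d.get? k := by
  induction cps generalizing d with
  | nil => simp [pvWFold]
  | cons c t ih =>
    simp only [pvWFold, List.foldl_cons] at *
    rw [ih]
    by_cases hk : k ∈ t <;> by_cases hc : k = c <;>
      simp [hk, hc, PySem.Dict.get?_insert]

lemma pvWFold_items (n W : Int) (cps : List Int) :
    (pvWFold n W cps PySem.Dict.empty).items
      = (PySem.Set.ofList cps).map (fun k => (k, [k + 1, min (k + W) n])) := by
  have hnd : (pvWFold n W cps PySem.Dict.empty).keys.Nodup := by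
    unfold pvWFold
    exact PySem.Dict.nodup_keys_foldl_insert cps
      (fun d cp => [cp + 1, min (cp + W) n]) _ PySem.Dict.nodup_keys_empty
  have hkeys : (pvWFold n W cps PySem.Dict.empty).keys = PySem.Set.ofList cps := by
    unfold pvWFold
    rw [PySem.Dict.keys_foldl_insert]
    simp [PySem.Set.update_eq_append_filter, PySem.Dict.keys_empty]
  rw [PySem.Dict.items_eq_map_keys _ hnd [], hkeys]
  apply List.map_congr_left
  intro k hk
  have hk' : k ∈ cps := (PySem.Set.mem_ofList cps k).mp hk
  rw [PySem.Dict.getD_eq_get?_getD, pvWFold_get?, if_pos hk']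
  rfl

-- a `flag = False; if …: flag = True` loop is an `any`
lemma pvFoldOr {α : Type} (l : List α) (p : α → Bool) (b : Bool) :
    l.foldl (fun f x => if p x then true else f) b = (b || l.any p) := by
  induction l generalizing b with
  | nil => simp
  | cons h t ih =>
    simp only [List.foldl_cons]
    by_cases hp : p h
    · rw [if_pos hp, ih]; simp [hp]
    · rw [if_neg hp, ih]; simp [hp]

lemma pvFlag2_eq (n W : Int) (cps : List Int) (v : Int) :
    pvFlag2 (pvWFold n W cps PySem.Dict.empty) v
      = cps.any (fun k => pvInRange (k + 1) (min (k + W) n) v) := by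
  unfold pvFlag2
  rw [pvFoldOr, pvWFold_items, List.any_map]
  simp only [Bool.false_or]
  apply Bool.eq_iff_iff.mpr
  simp only [List.any_eq_true]
  constructor
  · rintro ⟨k, hk, h⟩
    exact ⟨k, (PySem.Set.mem_ofList cps k).mp hk, h⟩
  · rintro ⟨k, hk, h⟩
    exact ⟨k, (PySem.Set.mem_ofList cps k).mpr hk, h⟩

lemma pvLoop2 (dets : List Int) (q : Int → Bool) (a b c d : Int) :
    dets.foldl (fun s cp => if !q cp then s.modify "false_pos" 0 (· + 1) else s) (pvScores a b c d)
      = pvScores a (b + (dets.countP (fun v => !q v) : Int)) c d := by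
  induction dets generalizing b with
  | nil => simp
  | cons v t ih =>
    simp only [List.foldl_cons]
    by_cases hq : q v
    · rw [if_neg (by simp [hq]), ih]
      have h2 : (v :: t).countP (fun v => !q v) = t.countP (fun v => !q v) := by simp [hq]
      rw [h2]
    · rw [if_pos (by simp [hq]), pvScores_fp, ih]
      have h2 : (v :: t).countP (fun v => !q v) = t.countP (fun v => !q v) + 1 := by simp [hq]
      rw [h2]
      have e1 : b + 1 + (t.countP (fun v => !q v) : Int)
          = b + ((t.countP (fun v => !q v) + 1 : Nat) : Int) := by push_cast; ring
      rw [e1]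

-- removing each element of `vals` (when present) from a duplicate-free list is a filter
lemma pvEraseFold (vals : List Int) (r : List Int) (h : r.Nodup) :
    vals.foldl (fun r x => if r.contains x then (PySem.List.remove? r x).getD r else r) r
      = r.filter (fun y => !vals.contains y) := by
  induction vals generalizing r with
  | nil => simp
  | cons x t ih =>
    simp only [List.foldl_cons]
    have hstep : (if r.contains x then (PySem.List.remove? r x).getD r else r) = r.erase x := by
      by_cases hx : x ∈ r
      · rw [if_pos (by simpa [List.contains_eq_mem] using hx),
            PySem.List.remove?_eq_some_erase r x hx]
        rfl
      · rw [if_neg (by simpa [List.contains_eq_mem] using hx), List.erase_of_not_mem hx]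
    rw [hstep, ih (r.erase x) (h.erase x), List.Nodup.erase_eq_filter h x, List.filter_filter]
    apply List.filter_congr
    intro y _
    by_cases hyx : y = x <;> by_cases hyt : y ∈ t <;>
      simp [hyx, List.contains_eq_mem, hyt]

lemma pvNodup_pyRange (a b : Int) : (PySem.List.pyRange a b 1).Nodup := by
  induction hn : (b - a).toNat generalizing a with
  | zero =>
    have : (PySem.List.pyRange a b 1).length = 0 := by
      rw [PySem.List.length_pyRange_one]; omega
    simp [List.eq_nil_of_length_eq_zero this]
  | succ m ih =>
    have hab : a < b := by omega
    rw [PySem.List.pyRange_one_cons hab]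
    refine List.Nodup.cons ?_ (ih (a + 1) (by omega))
    intro hmem
    have := (PySem.List.mem_pyRange_one).mp hmem
    omega

lemma pvStep3_eq (r : List Int) (p : Int × List Int) (h : r.Nodup) :
    pvStep3 r p = r.filter (fun y =>
      !pvInRange (PySem.List.pyGetD p.2 0 0) (PySem.List.pyGetD p.2 1 0) y) := by
  unfold pvStep3
  rw [pvEraseFold _ r h]
  apply List.filter_congr
  intro y _
  congr 1
  rw [List.contains_eq_mem]
  simp [PySem.List.mem_pyRange_one, pvInRange]

lemma pvLoop3 (items : List (Int × List Int)) (r : List Int) (h : r.Nodup) :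
    items.foldl pvStep3 r = r.filter (fun y => !items.any (fun p =>
      pvInRange (PySem.List.pyGetD p.2 0 0) (PySem.List.pyGetD p.2 1 0) y)) := by
  induction items generalizing r with
  | nil => simp
  | cons p t ih =>
    simp only [List.foldl_cons]
    rw [pvStep3_eq r p h, ih _ (h.filter _), List.filter_filter]
    apply List.filter_congr
    intro y _
    simp only [List.any_cons, Bool.not_or]
    rw [Bool.and_comm]

lemma pvCountP_not (l : List Int) (p : Int → Bool) :
    l.countP (fun a => !p a) = l.length - l.countP p := by
  induction l with
  | nil => rfl
  | cons h t ih =>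
    have hle := List.countP_le_length (p := p) (l := t)
    by_cases hp : p h <;> simp [hp, ih]; omega

lemma pvFilterLen_any (l : List Int) (p : Int → Bool) :
    ((l.filter p).length != 0) = l.any p := by
  induction l with
  | nil => rfl
  | cons h t ih => by_cases hp : p h <;> simp [hp, ih]

-- B's covered(x) equals A's window-membership test
lemma pvCovered_eq (n W : Int) (cps : List Int) (x : Int) :
    (pvWFold n W cps PySem.Dict.empty).values.any (pvSpanCovers x)
      = cps.any (fun k => pvInRange (k + 1) (min (k + W) n) x) := by
  have hv : (pvWFold n W cps PySem.Dict.empty).values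
      = (pvWFold n W cps PySem.Dict.empty).items.map (·.2) := rfl
  rw [hv, pvWFold_items, List.map_map, List.any_map]
  apply Bool.eq_iff_iff.mpr
  simp only [List.any_eq_true, Function.comp]
  constructor
  · rintro ⟨k, hk, h⟩
    exact ⟨k, (PySem.Set.mem_ofList cps k).mp hk, by simpa [pvSpanCovers, pvInRange] using h⟩
  · rintro ⟨k, hk, h⟩
    exact ⟨k, (PySem.Set.mem_ofList cps k).mpr hk, by simpa [pvSpanCovers, pvInRange] using h⟩

-- ===== VERDICT (by name: the statement is the Claim_ definition above) =====
theorem score_wl_detections_spec : Claim_equal_score_wl_detections := by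
  intro n cps det W _
  unfold Spec_score_wl_detections
  show score_wl_detections n cps det W = score_wl_detections_alt n cps det W
  unfold score_wl_detections score_wl_detections_alt
  have h0 : PySem.Dict.ofList [("true_pos", (0:Int)), ("false_pos", 0), ("true_neg", 0), ("false_neg", 0)]
      = pvScores 0 0 0 0 := rfl
  simp only [h0, pvLoop1]
  have hwf : cps.foldl (fun d cp => d.insert cp [cp + 1, min (cp + W) n]) PySem.Dict.empty
      = pvWFold n W cps PySem.Dict.empty := rfl
  simp only [hwf]
  rw [pvLoop2, pvLoop3 _ _ (pvNodup_pyRange 0 n), pvScores_tn]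
  refine Prod.ext ?_ rfl
  show ([("true_pos", _), ("false_pos", _), ("true_neg", _), ("false_neg", _)] : List (String × Int)) = _
  have htp : cps.countP (pvPA n W det)
      = cps.countP (fun cp => det.any (fun v => decide (cp + 1 ≤ v) && decide (v < min (cp + W) n))) := by
    apply List.countP_congr
    intro cp _
    rw [pvPA, pvFilterLen_any]
    rfl
  have hfp : det.countP (fun v => !pvFlag2 (pvWFold n W cps PySem.Dict.empty) v)
      = det.countP (fun v => !(pvWFold n W cps PySem.Dict.empty).values.any (pvSpanCovers v)) := by
    apply List.countP_congr
    intro v _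
    rw [pvFlag2_eq, pvCovered_eq]
  have htn : ((PySem.List.pyRange 0 n 1).filter (fun y =>
        !(pvWFold n W cps PySem.Dict.empty).items.any (fun p =>
          pvInRange (PySem.List.pyGetD p.2 0 0) (PySem.List.pyGetD p.2 1 0) y))).filter
        (fun v => !det.contains v)
      = (PySem.List.pyRange 0 n 1).filter (fun x =>
          !(pvWFold n W cps PySem.Dict.empty).values.any (pvSpanCovers x)
            && !(PySem.Set.ofList det).contains x) := by
    rw [List.filter_filter]
    apply List.filter_congr
    intro y _
    have h1 : (pvWFold n W cps PySem.Dict.empty).items.any (fun p =>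
        pvInRange (PySem.List.pyGetD p.2 0 0) (PySem.List.pyGetD p.2 1 0) y)
        = pvFlag2 (pvWFold n W cps PySem.Dict.empty) y := by
      rw [pvFlag2, pvFoldOr]; simp
    have h2 : (det.contains y) = ((PySem.Set.ofList det).contains y) := by
      simp [List.contains_eq_mem, PySem.Set.mem_ofList]
    rw [h1, pvFlag2_eq, ← pvCovered_eq, ← h2, Bool.and_comm]
  have hfn : (cps.countP (fun cp => !pvPA n W det cp) : Int)
      = (cps.length : Int) - (cps.countP (pvPA n W det) : Int) := by
    rw [pvCountP_not]
    have := List.countP_le_length (l := cps) (p := pvPA n W det)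
    push_cast [Nat.cast_sub this]
    ring
  simp only [List.cons.injEq, Prod.mk.injEq]
  refine ⟨⟨trivial, by rw [htp]; ring⟩, ⟨trivial, by rw [hfp]; ring⟩,
    ⟨trivial, by rw [htn]; simp [List.countP_eq_length_filter]⟩,
    ⟨trivial, by rw [hfn, htp]; ring⟩, trivial⟩
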